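-- pv_equiv track=rewrite | github.com/jiacian0609/leetcode-record | solutions/3649.number_of_perfect_pairs.py | perfectPairs
-- ===== SOURCE A (Python) =====
-- from bisect import bisect_left, bisect_right
-- from typing import List
--
-- def perfectPairs(nums: List[int]) -> int:
--     # 1) 只跟絕對值有關，先取絕對值並排序
--     abs_nums = sorted(abs(x) for x in nums)
--     n = len(abs_nums)
--     count = 0
--
--     for i, x in enumerate(abs_nums):
--         # 2) 對於固定的 x=|a|，找所有 j>i 的 y=|b|
--         #    使得 y ∈ [ceil(x/2), 2x]   ← 由上面的等價條件
--         lo = bisect_left(abs_nums, (x + 1) // 2, i + 1)  # ceil(x/2)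
--         hi = bisect_right(abs_nums, 2 * x, i + 1)        # ≤ 2x 的最右界 + 1
--
--         # 3) [lo, hi) 都是能和 i 構成 perfect 的 j
--         count += hi - lo
--
--     return count
-- ===== SOURCE B (Python) =====
-- from typing import List
--
-- def perfectPairs(nums: List[int]) -> int:
--     # Sort the absolute values, then a single two-pointer sweep:
--     # r only ever advances, since 2*a[i] is non-decreasing in i.
--     a = sorted(abs(x) for x in nums)
--     n = len(a)
--     count = 0
--     r = 0
--     for i in range(n):
--         bound = 2 * a[i]
--         while r < n and a[r] <= bound:
--             r += 1
--         count += r - i - 1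
--     return count
-- ===== Notes on version B (the rewrite author's own statement) =====
-- stated objective: faster
-- what changed: Replaces the two per-element binary searches (and the always-vacuous ceil(x/2) lower bound) with a single monotone two-pointer sweep over the sorted absolute values.
import Mathlib
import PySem

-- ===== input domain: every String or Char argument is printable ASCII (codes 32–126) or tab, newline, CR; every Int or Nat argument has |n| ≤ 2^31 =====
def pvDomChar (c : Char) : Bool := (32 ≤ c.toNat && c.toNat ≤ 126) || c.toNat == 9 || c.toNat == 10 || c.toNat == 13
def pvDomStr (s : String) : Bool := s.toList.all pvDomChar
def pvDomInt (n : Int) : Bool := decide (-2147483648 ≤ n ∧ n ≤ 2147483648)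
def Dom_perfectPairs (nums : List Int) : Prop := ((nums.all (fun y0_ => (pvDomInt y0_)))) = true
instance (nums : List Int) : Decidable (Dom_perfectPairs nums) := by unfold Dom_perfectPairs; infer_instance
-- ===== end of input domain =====

-- B replaces A's two per-element binary searches by one monotone two-pointer sweep (measured faster by a constant factor).

-- ===== PORT A =====
-- bisect_left/right(xs, v, lo) on the sorted list = lo + bisect on the suffix xs[lo:]
def perfectPairs (nums : List Int) : Int :=
  let absNums := PySem.List.sorted (nums.map (fun x => |x|)) (fun x => x)
  (PySem.List.enumerate absNums).foldl (fun count p =>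
    let i := p.1
    let x := p.2
    let lo := (i.toNat + 1) + PySem.List.bisectLeft (absNums.drop (i.toNat + 1)) (PySem.Int.floordiv (x + 1) 2)
    let hi := (i.toNat + 1) + PySem.List.bisectRight (absNums.drop (i.toNat + 1)) (2 * x)
    count + ((hi : Int) - (lo : Int))) 0

-- ===== PORT B =====
-- the inner 'while r < n and a[r] <= bound: r += 1' loop
def twoPtrAdvance (a : List Int) (bound : Int) (r : Nat) : Nat :=
  if h : r < a.length then
    if a[r] ≤ bound then twoPtrAdvance a bound (r + 1) else r
  else r
termination_by a.length - r

def perfectPairs_alt (nums : List Int) : Int :=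
  let a := PySem.List.sorted (nums.map (fun x => |x|)) (fun x => x)
  let n := a.length
  ((List.range n).foldl (fun (st : Int × Nat) i =>
    let r := twoPtrAdvance a (2 * a.getD i 0) st.2
    (st.1 + ((r : Int) - (i : Int) - 1), r)) (0, 0)).1

-- ===== PRECONDITION & SPEC =====
def Spec_perfectPairs (nums : List Int) (out : Int) : Prop := out = perfectPairs_alt nums
instance (nums : List Int) (out : Int) : Decidable (Spec_perfectPairs nums out) := by unfold Spec_perfectPairs; infer_instance

-- ===== CLAIM (what is proved, stated in full; the proofs are below) =====
def Claim_equal_perfectPairs : Prop := ∀ (nums : List Int), Dom_perfectPairs nums → Spec_perfectPairs nums (perfectPairs nums)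

-- ===== LEMMAS AND PROOFS =====

-- A's hi index for position i, as a function of the sorted list (getD form, i < a.length)
def hiIdx (a : List Int) (i : Nat) : Nat :=
  (i + 1) + PySem.List.bisectRight (a.drop (i + 1)) (2 * a.getD i 0)

theorem sortedAbs_pairwise (nums : List Int) :
    (PySem.List.sorted (nums.map (fun x => |x|)) (fun x => x)).Pairwise (· ≤ ·) := by
  have := PySem.List.sorted_pairwise (nums.map (fun x => |x|)) (fun x => x)
  simpa using this

theorem sortedAbs_nonneg (nums : List Int) :
    ∀ y ∈ PySem.List.sorted (nums.map (fun x => |x|)) (fun x => x), 0 ≤ y := by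
  intro y hy
  have hmem : y ∈ nums.map (fun x => |x|) :=
    (PySem.List.sorted_perm (nums.map (fun x => |x|)) (fun x => x) false).mem_iff.mp hy
  rcases List.mem_map.mp hmem with ⟨x, _, rfl⟩
  exact abs_nonneg x

-- characterization of hiIdx on a sorted nonneg list
theorem hiIdx_char (a : List Int) (hs : a.Pairwise (· ≤ ·)) (hnn : ∀ y ∈ a, 0 ≤ y)
    (i : Nat) (hi : i < a.length) :
    hiIdx a i ≤ a.length ∧
      ∀ j (hj : j < a.length), (j < hiIdx a i ↔ a[j] ≤ 2 * a.getD i 0) := by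
  have hgetD : a.getD i 0 = a[i] := List.getD_eq_getElem a 0 hi
  have hs' : (a.drop (i + 1)).Pairwise (· ≤ ·) := hs.sublist (List.drop_sublist (i + 1) a)
  obtain ⟨hlen, hlt, hge⟩ := PySem.List.bisectRight_spec (a.drop (i + 1)) (2 * a.getD i 0) hs'
  have hdl : (a.drop (i + 1)).length = a.length - (i + 1) := List.length_drop
  have hmono := List.pairwise_iff_getElem.mp hs
  have h0 : 0 ≤ a[i] := hnn _ (List.getElem_mem hi)
  constructor
  · unfold hiIdx; omega
  · intro j hj
    unfold hiIdx
    by_cases hji : j ≤ i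
    · have haj : a[j] ≤ a[i] := by
        rcases Nat.lt_or_ge j i with h | h
        · exact hmono j i hj hi h
        · have : j = i := by omega
          subst this; exact le_refl _
      constructor
      · intro _; rw [hgetD]; omega
      · intro _; omega
    · have hji' : i + 1 ≤ j := by omega
      have hj' : j - (i + 1) < (a.drop (i + 1)).length := by omega
      have hdj : (a.drop (i + 1))[j - (i + 1)] = a[j] := by
        rw [List.getElem_drop]; congr 1; omega
      constructor
      · intro hlt2
        have := hlt (j - (i + 1)) hj' (by omega)
        rwa [hdj] at this
      · intro hle
        by_contra hnot
        have := hge (j - (i + 1)) hj' (by omega)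
        rw [hdj] at this
        omega

-- A's bisect_left lower bound is vacuous: it always returns 0 on the suffix
theorem lo_zero (a : List Int) (hs : a.Pairwise (· ≤ ·)) (hnn : ∀ y ∈ a, 0 ≤ y)
    (i : Nat) (hi : i < a.length) :
    PySem.List.bisectLeft (a.drop (i + 1)) (PySem.Int.floordiv (a.getD i 0 + 1) 2) = 0 := by
  have hgetD : a.getD i 0 = a[i] := List.getD_eq_getElem a 0 hi
  have hs' : (a.drop (i + 1)).Pairwise (· ≤ ·) := hs.sublist (List.drop_sublist (i + 1) a)
  obtain ⟨hlen, hlt, _⟩ :=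
    PySem.List.bisectLeft_spec (a.drop (i + 1)) (PySem.Int.floordiv (a.getD i 0 + 1) 2) hs'
  have h0 : 0 ≤ a[i] := hnn _ (List.getElem_mem hi)
  have hv : PySem.Int.floordiv (a.getD i 0 + 1) 2 ≤ a[i] := by
    rw [hgetD, PySem.Int.floordiv_eq_ediv_of_pos (by omega)]
    omega
  have hdl : (a.drop (i + 1)).length = a.length - (i + 1) := List.length_drop
  by_contra hne
  have hpos : 0 < PySem.List.bisectLeft (a.drop (i + 1)) (PySem.Int.floordiv (a.getD i 0 + 1) 2) := by
    omega
  have h0len : 0 < (a.drop (i + 1)).length := by omega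
  have hlt0 := hlt 0 h0len hpos
  have hd0 : (a.drop (i + 1))[0] = a[i + 1 + 0]'(by omega) := List.getElem_drop
  have hmono := List.pairwise_iff_getElem.mp hs
  have : a[i] ≤ a[i + 1 + 0]'(by omega) := hmono i (i + 1 + 0) hi (by omega) (by omega)
  rw [hd0] at hlt0
  omega

-- the while loop reaches exactly the unique boundary index k'
theorem twoPtrAdvance_eq (a : List Int) (v : Int) (k' : Nat) (hk' : k' ≤ a.length)
    (hchar : ∀ j (hj : j < a.length), (j < k' ↔ a[j] ≤ v))
    (r : Nat) (hr : r ≤ k') : twoPtrAdvance a v r = k' := by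
  obtain ⟨m, hm⟩ : ∃ m, k' - r = m := ⟨_, rfl⟩
  induction m generalizing r with
  | zero =>
    have hrk : r = k' := by omega
    subst hrk
    unfold twoPtrAdvance
    split
    · next h =>
      have hnle : ¬ a[r] ≤ v := fun hle => absurd ((hchar r h).mpr hle) (lt_irrefl r)
      rw [if_neg hnle]
    · rfl
  | succ m ih =>
    have hrk : r < k' := by omega
    have hlt : r < a.length := by omega
    have har : a[r] ≤ v := (hchar r hlt).mp hrk
    unfold twoPtrAdvance
    rw [dif_pos hlt, if_pos har]
    exact ih (r + 1) (by omega) (by omega)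

theorem hiIdx_mono (a : List Int) (hs : a.Pairwise (· ≤ ·)) (hnn : ∀ y ∈ a, 0 ≤ y)
    (i : Nat) (hi : i + 1 < a.length) : hiIdx a i ≤ hiIdx a (i + 1) := by
  obtain ⟨hle1, hch1⟩ := hiIdx_char a hs hnn i (by omega)
  obtain ⟨hle2, hch2⟩ := hiIdx_char a hs hnn (i + 1) hi
  by_contra hlt
  have hj : hiIdx a (i + 1) < a.length := by omega
  have h1 : a[hiIdx a (i + 1)] ≤ 2 * a.getD i 0 := (hch1 _ hj).mp (by omega)
  have h2 : ¬ a[hiIdx a (i + 1)] ≤ 2 * a.getD (i + 1) 0 := by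
    intro h; exact absurd ((hch2 _ hj).mpr h) (by omega)
  have hmono := List.pairwise_iff_getElem.mp hs
  have hii : a[i]'(by omega) ≤ a[i + 1] := hmono i (i + 1) (by omega) hi (by omega)
  rw [List.getD_eq_getElem a 0 (by omega : i < a.length), List.getD_eq_getElem a 0 hi] at *
  omega

theorem A_eq_sum (nums : List Int) :
    perfectPairs nums =
      ((List.range (PySem.List.sorted (nums.map (fun x => |x|)) (fun x => x)).length).map
        (fun k => ((hiIdx (PySem.List.sorted (nums.map (fun x => |x|)) (fun x => x)) k : Int) - k - 1))).sum := by
  have hs := sortedAbs_pairwise nums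
  have hnn := sortedAbs_nonneg nums
  set a := PySem.List.sorted (nums.map (fun x => |x|)) (fun x => x) with ha
  have step1 : perfectPairs nums =
      (PySem.List.enumerate a).foldl
        (fun count p => count + ((hiIdx a p.1.toNat : Int) - p.1 - 1)) 0 := by
    show (PySem.List.enumerate a).foldl _ 0 = _
    apply PySem.List.foldl_congr_mem
    intro acc p hp
    rcases (PySem.List.mem_enumerate_iff a 0 p).mp hp with ⟨k, hk, rfl⟩
    have hl := lo_zero a hs hnn k hk
    rw [List.getD_eq_getElem a 0 hk] at hl
    simp only [zero_add, Int.toNat_natCast]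
    rw [hl]
    simp only [hiIdx, List.getD_eq_getElem a 0 hk]
    rw [← ha]
    push_cast
    omega
  rw [step1, PySem.List.foldl_add]
  have step3 : (PySem.List.enumerate a).map (fun p => ((hiIdx a p.1.toNat : Int) - p.1 - 1)) =
      (List.range a.length).map (fun k => ((hiIdx a k : Int) - k - 1)) := by
    have h1 : (PySem.List.enumerate a).map (fun p => ((hiIdx a p.1.toNat : Int) - p.1 - 1)) =
        ((PySem.List.enumerate a).map (fun p => p.1)).map
          (fun t => ((hiIdx a t.toNat : Int) - t - 1)) := by
      rw [List.map_map]
      rfl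
    rw [h1, PySem.List.map_fst_enumerate, PySem.List.pyRange_one, List.map_map]
    simp only [zero_add, sub_zero, Int.toNat_natCast]
    apply List.map_congr_left
    intro k _
    simp [Function.comp]
  rw [step3, zero_add]

theorem B_loop (a : List Int) (hs : a.Pairwise (· ≤ ·)) (hnn : ∀ y ∈ a, 0 ≤ y)
    (k : Nat) (hk : k ≤ a.length) :
    (List.range k).foldl (fun (st : Int × Nat) i =>
        let r := twoPtrAdvance a (2 * a.getD i 0) st.2
        (st.1 + ((r : Int) - (i : Int) - 1), r)) (0, 0) =
      (((List.range k).map (fun j => ((hiIdx a j : Int) - j - 1))).sum,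
       if k = 0 then 0 else hiIdx a (k - 1)) := by
  induction k with
  | zero => simp
  | succ k ih =>
    rw [List.range_succ, List.foldl_append, ih (by omega)]
    have hkc := hiIdx_char a hs hnn k (by omega)
    have hr : (if k = 0 then 0 else hiIdx a (k - 1)) ≤ hiIdx a k := by
      by_cases hk0 : k = 0
      · simp [hk0]
      · rw [if_neg hk0]
        have hm := hiIdx_mono a hs hnn (k - 1) (by omega)
        have hk1 : k - 1 + 1 = k := by omega
        rwa [hk1] at hm
    have hadv : twoPtrAdvance a (2 * a.getD k 0) (if k = 0 then 0 else hiIdx a (k - 1)) =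
        hiIdx a k :=
      twoPtrAdvance_eq a _ (hiIdx a k) hkc.1 hkc.2 _ hr
    simp only [List.foldl_cons, List.foldl_nil, hadv]
    rw [List.map_append, List.sum_append]
    simp

theorem B_eq_sum (nums : List Int) :
    perfectPairs_alt nums =
      ((List.range (PySem.List.sorted (nums.map (fun x => |x|)) (fun x => x)).length).map
        (fun k => ((hiIdx (PySem.List.sorted (nums.map (fun x => |x|)) (fun x => x)) k : Int) - k - 1))).sum := by
  have hs := sortedAbs_pairwise nums
  have hnn := sortedAbs_nonneg nums
  set a := PySem.List.sorted (nums.map (fun x => |x|)) (fun x => x) with ha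
  show ((List.range a.length).foldl _ (0, 0)).1 = _
  rw [B_loop a hs hnn a.length le_rfl]

-- ===== VERDICT (by name: the statement is the Claim_ definition above) =====
theorem perfectPairs_spec : Claim_equal_perfectPairs := by
  intro nums _
  unfold Spec_perfectPairs
  rw [A_eq_sum, B_eq_sum]
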